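-- pv_equiv track=rewrite | github.com/acemodou/Working-Copy | DataStructures/v1/Tries/algo/strings_madeup_of_strings.py | stringsMadeUpOfStrings
-- ===== SOURCE A (Python) =====
-- def stringsMadeUpOfStrings(strings, substrings):
--     trie = Trie()
--     for substring in substrings:
--         trie.insert(substring)
--
--     results = []
--     for string in strings:
--         if isMadeUpOfStrings(string, 0, trie, {}):
--             results.append(string)
--     return results
--
-- def isMadeUpOfStrings(string, startIdx, trie, memo):
--     if startIdx == len(string):
--         return True
--     if startIdx in memo:
--         return memo[startIdx]
--
--     currentNode = trie.root
--     for currIdx in range(startIdx, len(string)):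
--         currChar = string[currIdx]
--         if currChar not in currentNode:
--             break
--         currentNode = currentNode[currChar]
--         if currentNode["isEndOfString"] and \
--             isMadeUpOfStrings(string, currIdx    +1,  trie, memo):
--             memo[startIdx] = True
--             return True
--
--     memo[startIdx] = False
--     return False
--
-- class Trie:
--     def __init__(self):
--         self.root = {"isEndOfString" : False }
--
--     def insert(self, string):
--         currentNode = self.root
--         for i in range(len(string)):
--             letter = string[i]
--             if letter not in currentNode:
--                 currentNode[letter] = {"isEndOfString" : False }
--             currentNode = currentNode[letter]
--         currentNode["isEndOfString"] = True
-- ===== SOURCE B (Python) =====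
-- def stringsMadeUpOfStrings(strings, substrings):
--     words = set(substrings)
--     results = []
--     for s in strings:
--         n = len(s)
--         dp = [False] * (n + 1)
--         dp[0] = True
--         for i in range(1, n + 1):
--             for j in range(i):
--                 if dp[j] and s[j:i] in words:
--                     dp[i] = True
--                     break
--         if dp[n]:
--             results.append(s)
--     return results
-- ===== Notes on version B (the rewrite author's own statement) =====
-- stated objective: simpler
-- what changed: Replaces the hand-built trie plus memoized top-down recursion with a set of the substrings and the standard bottom-up word-break DP (boolean table over positions, slice membership in the set) per string.
import Mathlib
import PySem

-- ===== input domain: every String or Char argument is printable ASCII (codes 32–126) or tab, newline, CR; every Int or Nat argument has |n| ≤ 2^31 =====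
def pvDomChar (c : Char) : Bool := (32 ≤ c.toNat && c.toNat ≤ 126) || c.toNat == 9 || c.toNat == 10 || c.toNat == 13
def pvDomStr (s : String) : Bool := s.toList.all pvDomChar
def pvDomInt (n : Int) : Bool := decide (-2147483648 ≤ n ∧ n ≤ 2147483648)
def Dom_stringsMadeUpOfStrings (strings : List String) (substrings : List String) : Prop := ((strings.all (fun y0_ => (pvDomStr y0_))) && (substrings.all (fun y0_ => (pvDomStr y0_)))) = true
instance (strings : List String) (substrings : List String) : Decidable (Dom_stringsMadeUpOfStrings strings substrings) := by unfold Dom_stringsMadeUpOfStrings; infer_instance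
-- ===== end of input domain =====

-- B replaces A's trie + memoized recursion by a set of the substrings and the standard
-- word-break DP per string (objective: simpler); same results, order and duplicates preserved.


-- ===== PORT A =====
-- Python's trie node is a dict {char: childNode, "isEndOfString": bool}; the char→child map
-- and the flag are modelled as the two components of PNode (the "isEndOfString" key can never
-- collide with a single-char key, so this is exact). Children keep dict insertion order.
mutual
inductive PNode : Type
  | mk : Bool → PChildren → PNode
inductive PChildren : Type
  | nil : PChildren
  | cons : Char → PNode → PChildren → PChildren
end

def PNode.flag : PNode → Bool
  | .mk f _ => f

def PNode.children : PNode → PChildren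
  | .mk _ c => c

-- dict lookup currentNode[letter] / 'letter in currentNode'
def childGet : PChildren → Char → Option PNode
  | .nil, _ => none
  | .cons c n rest, x => if c = x then some n else childGet rest x

-- dict store currentNode[letter] = node (overwrite keeps position, new key appends)
def childSet : PChildren → Char → PNode → PChildren
  | .nil, x, n => .cons x n .nil
  | .cons c m rest, x, n => if c = x then .cons c n rest else .cons c m (childSet rest x n)

-- Trie.insert: descend letter by letter (creating missing nodes), set the final flag
def insertW : PNode → List Char → PNode
  | .mk _ ch, [] => .mk true ch
  | .mk f ch, c :: rest =>
    .mk f (childSet ch c (insertW ((childGet ch c).getD (.mk false .nil)) rest))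

-- 'trie = Trie(); for substring in substrings: trie.insert(substring)'
def buildTrie (substrings : List String) : PNode :=
  substrings.foldl (fun t s => insertW t s.toList) (.mk false .nil)

mutual
-- isMadeUpOfStrings(string, startIdx, trie, memo); returns (result, memo after mutation)
def isMadeUp (cs : List Char) (startIdx : Nat) (root : PNode) (memo : PySem.Dict Nat Bool) :
    Bool × PySem.Dict Nat Bool :=
  if startIdx = cs.length then (true, memo)
  else
    match memo.get? startIdx with
    | some b => (b, memo)
    | none =>
      let p := madeLoop cs (cs.drop startIdx) root root memo
      (p.1, p.2.insert startIdx p.1)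
termination_by 2 * (cs.length - startIdx) + 1
decreasing_by simp [List.length_drop]
-- the 'for currIdx in range(startIdx, len(string))' loop; rem is the chars still to scan,
-- so Python's currIdx+1 is cs.length - rest.length (the index right after the consumed char)
def madeLoop (cs : List Char) (rem : List Char) (root node : PNode) (memo : PySem.Dict Nat Bool) :
    Bool × PySem.Dict Nat Bool :=
  match rem with
  | [] => (false, memo)
  | c :: rest =>
    match childGet node.children c with
    | none => (false, memo)                   -- break
    | some nd =>
      if nd.flag then
        let p := isMadeUp cs (cs.length - rest.length) root memo
        if p.1 then (true, p.2) else madeLoop cs rest root nd p.2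
      else madeLoop cs rest root nd memo
termination_by 2 * rem.length
decreasing_by all_goals (simp; try omega)
end

def stringsMadeUpOfStrings (strings : List String) (substrings : List String) : List String :=
  let trie := buildTrie substrings
  strings.foldl
    (fun results s =>
      if (isMadeUp s.toList 0 trie PySem.Dict.empty).1 then results ++ [s] else results)
    []

-- ===== PORT B =====
-- inner 'for j in range(i): if dp[j] and s[j:i] in words: dp[i] = True; break'
-- (set-then-break over an ascending range IS List.any); the slice s[j:i] with
-- 0 ≤ j < i ≤ len(s) is exactly (drop j).take (i - j)
def wordBreakCell (cs : List Char) (words : PySem.Set String) (dp : List Bool) (i : Nat) : Bool :=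
  (List.range i).any fun j =>
    dp.getD j false && PySem.Set.contains words (String.ofList ((cs.drop j).take (i - j)))

-- dp = [False]*(n+1); dp[0] = True; for i in range(1, n+1): …
def wordBreakDP (cs : List Char) (words : PySem.Set String) : List Bool :=
  (List.range' 1 cs.length).foldl
    (fun dp i => dp.set i (wordBreakCell cs words dp i))
    (true :: List.replicate cs.length false)

def stringsMadeUpOfStrings_alt (strings : List String) (substrings : List String) : List String :=
  let words : PySem.Set String := PySem.Set.ofList substrings
  strings.foldl
    (fun results s =>
      if (wordBreakDP s.toList words).getD s.toList.length false then results ++ [s]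
      else results)
    []

-- ===== PRECONDITION & SPEC =====
def Spec_stringsMadeUpOfStrings (strings : List String) (substrings : List String) (out : List String) : Prop := out = stringsMadeUpOfStrings_alt strings substrings
instance (strings : List String) (substrings : List String) (out : List String) : Decidable (Spec_stringsMadeUpOfStrings strings substrings out) := by unfold Spec_stringsMadeUpOfStrings; infer_instance

-- ===== CLAIM (what is proved, stated in full; the proofs are below) =====
def Claim_equal_stringsMadeUpOfStrings : Prop := ∀ (strings : List String) (substrings : List String), Dom_stringsMadeUpOfStrings strings substrings → Spec_stringsMadeUpOfStrings strings substrings (stringsMadeUpOfStrings strings substrings)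

-- ===== LEMMAS AND PROOFS =====

-- 'cs is a concatenation of nonempty words of ws'
def Pieces (ws : List (List Char)) (cs : List Char) : Prop :=
  ∃ l : List (List Char), (∀ p ∈ l, p ∈ ws ∧ p ≠ []) ∧ l.flatten = cs

theorem pieces_nil (ws : List (List Char)) : Pieces ws [] := ⟨[], by simp, rfl⟩

theorem pieces_iff_left (ws : List (List Char)) (cs : List Char) :
    Pieces ws cs ↔ cs = [] ∨ ∃ q r, cs = q ++ r ∧ q ≠ [] ∧ q ∈ ws ∧ Pieces ws r := by
  constructor
  · rintro ⟨l, hl, rfl⟩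
    cases l with
    | nil => left; rfl
    | cons p l' =>
      right
      exact ⟨p, l'.flatten, by simp, (hl p (by simp)).2, (hl p (by simp)).1,
        l', fun x hx => hl x (by simp [hx]), rfl⟩
  · rintro (rfl | ⟨q, r, rfl, hq, hqw, l, hl, rfl⟩)
    · exact pieces_nil ws
    · refine ⟨q :: l, ?_, by simp⟩
      intro p hp
      rcases List.mem_cons.1 hp with rfl | hp
      · exact ⟨hqw, hq⟩
      · exact hl p hp

theorem pieces_iff_right (ws : List (List Char)) (cs : List Char) :
    Pieces ws cs ↔ cs = [] ∨ ∃ r q, cs = r ++ q ∧ q ≠ [] ∧ q ∈ ws ∧ Pieces ws r := by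
  constructor
  · rintro ⟨l, hl, rfl⟩
    obtain rfl | ⟨l', p, rfl⟩ := l.eq_nil_or_concat
    · left; rfl
    · right
      exact ⟨l'.flatten, p, by simp, (hl p (by simp)).2, (hl p (by simp)).1,
        l', fun x hx => hl x (by simp [hx]), rfl⟩
  · rintro (rfl | ⟨r, q, rfl, hq, hqw, l, hl, rfl⟩)
    · exact pieces_nil ws
    · exact ⟨l ++ [q], by
        rintro p hp
        rcases List.mem_append.1 hp with hp | hp
        · exact hl p hp
        · simp at hp; subst hp; exact ⟨hqw, hq⟩, by simp⟩

-- ---- trie lemmas ----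
def descend : PNode → List Char → Option PNode
  | n, [] => some n
  | n, c :: rest =>
    match childGet n.children c with
    | none => none
    | some m => descend m rest

def flagAt (t : PNode) (p : List Char) : Bool :=
  ((descend t p).map PNode.flag).getD false

theorem childGet_childSet : ∀ (ch : PChildren) (x y : Char) (n : PNode),
    childGet (childSet ch x n) y = if x = y then some n else childGet ch y
  | .nil, x, y, n => by by_cases h : x = y <;> simp [childSet, childGet, h]
  | .cons c m rest, x, y, n => by
    have ih := childGet_childSet rest x y n
    by_cases hcx : c = x
    · subst hcx
      by_cases h : c = y <;> simp [childSet, childGet, h]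
    · by_cases h : c = y
      · subst h
        have hxc : ¬ x = c := fun h' => hcx h'.symm
        simp [childSet, if_neg hcx, childGet, hxc]
      · simp [childSet, childGet, hcx, h, ih]

theorem descend_base (f : Bool) (p : List Char) :
    descend (PNode.mk f .nil) p = if p = [] then some (PNode.mk f .nil) else none := by
  cases p with
  | nil => rfl
  | cons c rest => simp [descend, PNode.children, childGet]

theorem descend_insert_isSome (p : List Char) : ∀ (t : PNode) (w : List Char),
    ((descend (insertW t w) p).isSome = true ↔ p <+: w ∨ (descend t p).isSome = true) := by
  induction p with
  | nil => intro t w; simp [descend]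
  | cons c p' ih =>
    intro t w
    obtain ⟨f, ch⟩ := t
    cases w with
    | nil =>
      simp only [insertW, descend, PNode.children]
      constructor
      · intro h; right; exact h
      · rintro (h | h)
        · exact absurd h (by simp)
        · exact h
    | cons d w' =>
      simp only [insertW, descend, PNode.children, childGet_childSet]
      by_cases hdc : d = c
      · subst hdc
        rw [if_pos rfl]
        rcases hget : childGet ch d with _ | child
        · simp only [Option.getD_none]
          rw [ih]
          constructor
          · rintro (h | h)
            · exact Or.inl (by simpa [List.cons_prefix_cons] using h)
            · rw [descend_base] at h
              split at h
              · subst p'; exact Or.inl (by simp)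
              · simp at h
          · rintro (h | h)
            · rcases List.cons_prefix_cons.1 h with ⟨-, h2⟩; exact Or.inl h2
            · simp at h
        · simp only [Option.getD_some]
          rw [ih]
          constructor
          · rintro (h | h)
            · exact Or.inl (by simpa [List.cons_prefix_cons] using h)
            · exact Or.inr h
          · rintro (h | h)
            · rcases List.cons_prefix_cons.1 h with ⟨-, h2⟩; exact Or.inl h2
            · exact Or.inr h
      · rw [if_neg hdc]
        constructor
        · intro h; right; exact h
        · rintro (h | h)
          · rcases List.cons_prefix_cons.1 h with ⟨h1, -⟩; exact absurd h1.symm hdc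
          · exact h

theorem flagAt_insert (p : List Char) : ∀ (t : PNode) (w : List Char),
    (flagAt (insertW t w) p = true ↔ p = w ∨ flagAt t p = true) := by
  induction p with
  | nil =>
    intro t w
    obtain ⟨f, ch⟩ := t
    cases w with
    | nil => simp [insertW, flagAt, descend, PNode.flag]
    | cons d w' =>
      simp [insertW, flagAt, descend, PNode.flag]
  | cons c p' ih =>
    intro t w
    obtain ⟨f, ch⟩ := t
    cases w with
    | nil =>
      simp only [insertW, flagAt, descend, PNode.children]
      constructor
      · intro h; right; exact h
      · rintro (h | h)
        · exact absurd h (by simp)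
        · exact h
    | cons d w' =>
      simp only [insertW, flagAt, descend, PNode.children, childGet_childSet]
      by_cases hdc : d = c
      · subst hdc
        rw [if_pos rfl]
        rcases hget : childGet ch d with _ | child
        · simp only [Option.getD_none]
          have := ih (PNode.mk false .nil) w'
          simp only [flagAt] at this
          rw [this]
          constructor
          · rintro (h | h)
            · subst h; exact Or.inl rfl
            · rw [descend_base] at h
              split at h
              · simp [PNode.flag] at h
              · simp at h
          · rintro (h | h)
            · injection h with h1 h2; exact Or.inl h2
            · simp at h
        · simp only [Option.getD_some]
          have := ih child w'
          simp only [flagAt] at this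
          rw [this]
          constructor
          · rintro (h | h)
            · subst h; exact Or.inl rfl
            · exact Or.inr h
          · rintro (h | h)
            · injection h with h1 h2; exact Or.inl h2
            · exact Or.inr h
      · rw [if_neg hdc]
        constructor
        · intro h; right; exact h
        · rintro (h | h)
          · injection h with h1 h2; exact absurd h1.symm hdc
          · exact h

theorem flag_buildTrie (subs : List String) (p : List Char) :
    flagAt (buildTrie subs) p = true ↔ p ∈ subs.map String.toList := by
  have gen : ∀ (l : List String) (t : PNode),
      (flagAt (l.foldl (fun t s => insertW t s.toList) t) p = true ↔
        p ∈ l.map String.toList ∨ flagAt t p = true) := by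
    intro l
    induction l with
    | nil => intro t; simp
    | cons s l' ihl =>
      intro t
      simp only [List.foldl_cons, ihl, List.map_cons, List.mem_cons]
      rw [flagAt_insert]
      tauto
  rw [buildTrie, gen]
  have : flagAt (PNode.mk false .nil) p = false := by
    simp only [flagAt, descend_base]
    split <;> simp [PNode.flag]
  simp [this]

theorem descend_buildTrie_isSome (subs : List String) (p : List Char) :
    (descend (buildTrie subs) p).isSome = true ↔ p = [] ∨ ∃ s ∈ subs, p <+: s.toList := by
  have gen : ∀ (l : List String) (t : PNode),
      ((descend (l.foldl (fun t s => insertW t s.toList) t) p).isSome = true ↔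
        (∃ s ∈ l, p <+: s.toList) ∨ (descend t p).isSome = true) := by
    intro l
    induction l with
    | nil => intro t; simp
    | cons s l' ihl =>
      intro t
      simp only [List.foldl_cons, ihl, List.mem_cons]
      rw [descend_insert_isSome]
      constructor
      · rintro (⟨x, hx, hp⟩ | h | h)
        · exact Or.inl ⟨x, Or.inr hx, hp⟩
        · exact Or.inl ⟨s, Or.inl rfl, h⟩
        · exact Or.inr h
      · rintro (⟨x, hx | hx, hp⟩ | h)
        · subst hx; exact Or.inr (Or.inl hp)
        · exact Or.inl ⟨x, hx, hp⟩
        · exact Or.inr (Or.inr h)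
  rw [buildTrie, gen]
  rw [descend_base]
  constructor
  · rintro (⟨s, hs, hp⟩ | h)
    · exact Or.inr ⟨s, hs, hp⟩
    · split at h
      · left; assumption
      · simp at h
  · rintro (rfl | ⟨s, hs, hp⟩)
    · right; simp
    · left; exact ⟨s, hs, hp⟩

theorem descend_snoc (p : List Char) (c : Char) : ∀ (t : PNode),
    descend t (p ++ [c]) = (descend t p).bind (fun n => childGet n.children c) := by
  induction p with
  | nil =>
    intro t
    cases h : childGet t.children c <;> simp [descend, h]
  | cons d p' ih =>
    intro t
    simp only [List.cons_append, descend]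
    rcases childGet t.children d with _ | m
    · rfl
    · exact ih m

-- ---- A-side correctness: memo invariant and the mutual recursion ----
def MemoInv (ws : List (List Char)) (cs : List Char) (memo : PySem.Dict Nat Bool) : Prop :=
  ∀ k b, memo.get? k = some b → (b = true ↔ Pieces ws (cs.drop k))

theorem made_correct (subs : List String) : ∀ (N : Nat),
    (∀ (cs : List Char) (i : Nat) (memo : PySem.Dict Nat Bool),
      2 * (cs.length - i) + 1 ≤ N → i ≤ cs.length →
      MemoInv (subs.map String.toList) cs memo →
      ((isMadeUp cs i (buildTrie subs) memo).1 = true ↔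
        Pieces (subs.map String.toList) (cs.drop i)) ∧
      MemoInv (subs.map String.toList) cs (isMadeUp cs i (buildTrie subs) memo).2) ∧
    (∀ (cs : List Char) (i : Nat) (pfx rem : List Char) (node : PNode)
       (memo : PySem.Dict Nat Bool),
      2 * rem.length ≤ N → i ≤ cs.length → cs.drop i = pfx ++ rem →
      descend (buildTrie subs) pfx = some node →
      MemoInv (subs.map String.toList) cs memo →
      ((madeLoop cs rem (buildTrie subs) node memo).1 = true ↔
        ∃ q r, rem = q ++ r ∧ q ≠ [] ∧ (pfx ++ q) ∈ subs.map String.toList ∧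
          Pieces (subs.map String.toList) r) ∧
      MemoInv (subs.map String.toList) cs (madeLoop cs rem (buildTrie subs) node memo).2) := by
  intro N
  induction N with
  | zero =>
    constructor
    · intro cs i memo hN; omega
    · intro cs i pfx rem node memo hN hi hdrop hdesc hinv
      obtain rfl : rem = [] := by cases rem with | nil => rfl | cons c r => simp at hN
      simp only [madeLoop]
      refine ⟨?_, hinv⟩
      simp only [Bool.false_eq_true, false_iff]
      rintro ⟨q, r, hqr, hq, -, -⟩
      exact hq (by simpa using (List.append_eq_nil_iff.1 hqr.symm).1)
  | succ N IH =>
    obtain ⟨IH1, IH2⟩ := IH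
    constructor
    · -- isMadeUp
      intro cs i memo hN hi hinv
      by_cases hlen : i = cs.length
      · subst hlen
        simp only [isMadeUp]
        exact ⟨by simpa using pieces_nil (subs.map String.toList), hinv⟩
      · have hiLt : i < cs.length := lt_of_le_of_ne hi hlen
        cases hmemo : memo.get? i with
        | some b =>
          simp only [isMadeUp, if_neg hlen, hmemo]
          exact ⟨hinv i b hmemo, hinv⟩
        | none =>
          have hloop := IH2 cs i [] (cs.drop i) (buildTrie subs) memo
            (by simp only [List.length_drop]; omega) hi (by simp) rfl hinv
          simp only [isMadeUp, if_neg hlen, hmemo]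
          have hiff : (madeLoop cs (cs.drop i) (buildTrie subs) (buildTrie subs) memo).1 = true ↔
              Pieces (subs.map String.toList) (cs.drop i) := by
            rw [hloop.1, pieces_iff_left]
            have hne : cs.drop i ≠ [] := by
              intro h
              have := congrArg List.length h
              simp only [List.length_drop, List.length_nil] at this
              omega
            simp [hne]
          refine ⟨hiff, ?_⟩
          intro k b hk
          rw [PySem.Dict.get?_insert] at hk
          split at hk
          · rename_i hki
            subst hki
            injection hk with hk
            subst hk
            exact hiff
          · exact hloop.2 k b hk
    · -- madeLoop
      intro cs i pfx rem node memo hN hi hdrop hdesc hinv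
      cases rem with
      | nil =>
        simp only [madeLoop]
        refine ⟨?_, hinv⟩
        simp only [Bool.false_eq_true, false_iff]
        rintro ⟨q, r, hqr, hq, -, -⟩
        exact hq (by simpa using (List.append_eq_nil_iff.1 hqr.symm).1)
      | cons c rest =>
        simp only [List.length_cons] at hN
        have hlen' : cs.length - i = pfx.length + (rest.length + 1) := by
          have := congrArg List.length hdrop
          simp only [List.length_drop, List.length_append, List.length_cons] at this
          omega
        have hdroprest : cs.drop (i + (pfx.length + 1)) = rest := by
          rw [← List.drop_drop, hdrop]
          simp
        cases hchild : childGet node.children c with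
        | none =>
          simp only [madeLoop, hchild]
          refine ⟨?_, hinv⟩
          simp only [Bool.false_eq_true, false_iff]
          rintro ⟨q, r, hqr, hq, hmem, -⟩
          obtain ⟨q', rfl⟩ : ∃ q', q = c :: q' := by
            cases q with
            | nil => exact absurd rfl hq
            | cons a q' => exact ⟨q', by injection hqr with h1 _; rw [h1]⟩
          obtain ⟨w, hw, hwl⟩ := List.mem_map.1 hmem
          have hsome : (descend (buildTrie subs) (pfx ++ [c])).isSome = true := by
            rw [descend_buildTrie_isSome]
            refine Or.inr ⟨w, hw, ?_⟩
            rw [hwl]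
            exact ⟨q', by simp⟩
          rw [descend_snoc, hdesc] at hsome
          simp [hchild] at hsome
        | some nd =>
          have hdescnew : descend (buildTrie subs) (pfx ++ [c]) = some nd := by
            rw [descend_snoc, hdesc]
            simpa using hchild
          have hmemflag : (pfx ++ [c]) ∈ subs.map String.toList ↔ nd.flag = true := by
            rw [← flag_buildTrie]
            simp [flagAt, hdescnew]
          have hdropnew : cs.drop i = (pfx ++ [c]) ++ rest := by
            rw [hdrop]; simp
          by_cases hflag : nd.flag = true
          · -- flag true: recursive isMadeUp, then maybe continue
            have hrec := IH1 cs (cs.length - rest.length) memo (by omega) (by omega) hinv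
            have hidx : cs.length - rest.length = i + (pfx.length + 1) := by omega
            rw [hidx, hdroprest] at hrec
            simp only [madeLoop, hchild, hflag, if_true]
            rw [← hidx] at hrec
            by_cases hp : (isMadeUp cs (cs.length - rest.length) (buildTrie subs) memo).1 = true
            · simp only [hp, if_true]
              refine ⟨?_, hrec.2⟩
              simp only [true_iff]
              exact ⟨[c], rest, rfl, by simp, hmemflag.2 hflag, hrec.1.1 hp⟩
            · simp only [hp, if_false, Bool.false_eq_true]
              have hloop := IH2 cs i (pfx ++ [c]) rest nd
                (isMadeUp cs (cs.length - rest.length) (buildTrie subs) memo).2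
                (by omega) hi hdropnew hdescnew hrec.2
              refine ⟨?_, hloop.2⟩
              rw [hloop.1]
              constructor
              · rintro ⟨q, r, rfl, hq, hmem, hr⟩
                exact ⟨c :: q, r, rfl, by simp, by simpa using hmem, hr⟩
              · rintro ⟨q, r, hqr, hq, hmem, hr⟩
                obtain ⟨q', rfl⟩ : ∃ q', q = c :: q' := by
                  cases q with
                  | nil => exact absurd rfl hq
                  | cons a q' => exact ⟨q', by injection hqr with h1 _; rw [h1]⟩
                have hrest : rest = q' ++ r := by injection hqr
                by_cases hq' : q' = []
                · exfalso
                  subst hq'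
                  simp only [List.nil_append] at hrest
                  subst hrest
                  exact hp (hrec.1.2 hr)
                · exact ⟨q', r, hrest, hq', by simpa using hmem, hr⟩
          · -- flag false: just continue the loop
            have hflag' : nd.flag = false := by simpa using hflag
            simp only [madeLoop, hchild, hflag', Bool.false_eq_true, if_false]
            have hloop := IH2 cs i (pfx ++ [c]) rest nd memo (by omega) hi hdropnew hdescnew hinv
            refine ⟨?_, hloop.2⟩
            rw [hloop.1]
            constructor
            · rintro ⟨q, r, rfl, hq, hmem, hr⟩
              exact ⟨c :: q, r, rfl, by simp, by simpa using hmem, hr⟩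
            · rintro ⟨q, r, hqr, hq, hmem, hr⟩
              obtain ⟨q', rfl⟩ : ∃ q', q = c :: q' := by
                cases q with
                | nil => exact absurd rfl hq
                | cons a q' => exact ⟨q', by injection hqr with h1 _; rw [h1]⟩
              have hrest : rest = q' ++ r := by injection hqr
              by_cases hq' : q' = []
              · exfalso
                subst hq'
                exact hflag (hmemflag.1 hmem)
              · exact ⟨q', r, hrest, hq', by simpa using hmem, hr⟩

theorem A_bool (subs : List String) (cs : List Char) :
    ((isMadeUp cs 0 (buildTrie subs) PySem.Dict.empty).1 = true ↔
      Pieces (subs.map String.toList) cs) := by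
  have h := (made_correct subs (2 * cs.length + 1)).1 cs 0 PySem.Dict.empty
    (by omega) (by omega) (by intro k b hk; rw [PySem.Dict.get?_empty] at hk; cases hk)
  simpa using h.1

-- ---- B-side correctness: the word-break DP ----
theorem cell_correct (subs : List String) (cs : List Char) (dp : List Bool) (k : Nat)
    (hk : k < cs.length)
    (hdp : ∀ j, j ≤ k → (dp.getD j false = true ↔ Pieces (subs.map String.toList) (cs.take j))) :
    (wordBreakCell cs (PySem.Set.ofList subs) dp (k + 1) = true ↔
      Pieces (subs.map String.toList) (cs.take (k + 1))) := by
  unfold wordBreakCell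
  rw [List.any_eq_true]
  constructor
  · rintro ⟨j, hj, hcond⟩
    rw [List.mem_range] at hj
    rw [Bool.and_eq_true] at hcond
    obtain ⟨h1, h2⟩ := hcond
    have hjk : j ≤ k := by omega
    have hpj := (hdp j hjk).1 h1
    have hqmem : ((cs.drop j).take (k + 1 - j)) ∈ subs.map String.toList := by
      rw [PySem.Set.contains_iff, PySem.Set.mem_ofList] at h2
      exact List.mem_map.2 ⟨_, h2, by rw [String.toList_ofList]⟩
    rw [pieces_iff_right]
    right
    refine ⟨cs.take j, (cs.drop j).take (k + 1 - j), ?_, ?_, hqmem, hpj⟩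
    · have h : k + 1 = j + (k + 1 - j) := by omega
      rw [h, List.take_add, Nat.add_sub_cancel_left]
    · intro h
      have := congrArg List.length h
      simp only [List.length_take, List.length_drop, List.length_nil] at this
      omega
  · intro hp
    rw [pieces_iff_right] at hp
    rcases hp with h | ⟨r, q, hrq, hq, hmem, hr⟩
    · exfalso
      have := congrArg List.length h
      simp only [List.length_take, List.length_nil] at this
      omega
    · have hlenq : r.length + q.length = k + 1 := by
        have := congrArg List.length hrq
        simp only [List.length_take, List.length_append] at this
        omega
      have hql : q.length ≠ 0 := fun h0 => hq (List.eq_nil_of_length_eq_zero h0)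
      have hjk : r.length ≤ k := by omega
      refine ⟨r.length, List.mem_range.2 (by omega), ?_⟩
      rw [Bool.and_eq_true]
      constructor
      · have hrlen : r.length ≤ k + 1 := by omega
        have hrj : r = cs.take r.length := by
          have h := congrArg (List.take r.length) hrq
          rw [List.take_take, min_eq_left hrlen, List.take_left] at h
          exact h.symm
        exact (hdp r.length hjk).2 (hrj ▸ hr)
      · have hqj : q = (cs.drop r.length).take (k + 1 - r.length) := by
          have h := congrArg (List.drop r.length) hrq
          rw [List.drop_take, List.drop_left] at h
          exact h.symm
        rw [PySem.Set.contains_iff, PySem.Set.mem_ofList]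
        obtain ⟨w, hw, hwl⟩ := List.mem_map.1 hmem
        rw [← hqj, ← hwl, String.ofList_toList]
        exact hw

theorem dp_invariant (subs : List String) (cs : List Char) : ∀ k, k ≤ cs.length →
    ((List.range' 1 k).foldl
        (fun dp i => dp.set i (wordBreakCell cs (PySem.Set.ofList subs) dp i))
        (true :: List.replicate cs.length false)).length = cs.length + 1 ∧
    ∀ j, j ≤ k →
      (((List.range' 1 k).foldl
          (fun dp i => dp.set i (wordBreakCell cs (PySem.Set.ofList subs) dp i))
          (true :: List.replicate cs.length false)).getD j false = true ↔
        Pieces (subs.map String.toList) (cs.take j)) := by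
  intro k
  induction k with
  | zero =>
    intro _
    refine ⟨by simp, ?_⟩
    intro j hj
    interval_cases j
    simpa using pieces_nil (subs.map String.toList)
  | succ k ihk =>
    intro hk
    have ih := ihk (by omega)
    rw [List.range'_1_concat, List.foldl_append]
    simp only [List.foldl_cons, List.foldl_nil]
    have h1k : 1 + k = k + 1 := by omega
    rw [h1k]
    set dp := (List.range' 1 k).foldl
      (fun dp i => dp.set i (wordBreakCell cs (PySem.Set.ofList subs) dp i))
      (true :: List.replicate cs.length false) with hdpdef
    refine ⟨by rw [List.length_set]; exact ih.1, ?_⟩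
    intro j hj
    by_cases hjk : j = k + 1
    · subst hjk
      have hlt : k + 1 < dp.length := by rw [ih.1]; omega
      rw [List.getD_eq_getElem?_getD, List.getElem?_set_self hlt, Option.getD_some]
      exact cell_correct subs cs dp k (by omega) ih.2
    · have hj' : j ≤ k := by omega
      rw [List.getD_eq_getElem?_getD, List.getElem?_set_ne (by omega),
        ← List.getD_eq_getElem?_getD]
      exact ih.2 j hj'

theorem B_bool (subs : List String) (cs : List Char) :
    ((wordBreakDP cs (PySem.Set.ofList subs)).getD cs.length false = true ↔
      Pieces (subs.map String.toList) cs) := by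
  have h := (dp_invariant subs cs cs.length le_rfl).2 cs.length le_rfl
  unfold wordBreakDP
  simpa using h

theorem perString (subs : List String) (s : String) :
    (isMadeUp s.toList 0 (buildTrie subs) PySem.Dict.empty).1 =
      (wordBreakDP s.toList (PySem.Set.ofList subs)).getD s.toList.length false := by
  rw [Bool.eq_iff_iff, A_bool, B_bool]

-- ===== VERDICT (by name: the statement is the Claim_ definition above) =====
theorem stringsMadeUpOfStrings_spec : Claim_equal_stringsMadeUpOfStrings := by
  intro strings substrings _
  unfold Spec_stringsMadeUpOfStrings
  simp only [stringsMadeUpOfStrings, stringsMadeUpOfStrings_alt]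
  have hfun : (fun (results : List String) (s : String) =>
        if (isMadeUp s.toList 0 (buildTrie substrings) PySem.Dict.empty).1 then results ++ [s]
        else results) =
      (fun (results : List String) (s : String) =>
        if (wordBreakDP s.toList (PySem.Set.ofList substrings)).getD s.toList.length false then
          results ++ [s]
        else results) := by
    funext r s
    rw [perString]
  rw [hfun]
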